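-- pv_equiv track=rewrite | github.com/MeetKai/functionary | functionary/train/custom_datasets.py | pack_data_points_by_length
-- ===== SOURCE A (Python) =====
-- from typing import Any, Dict, List, Optional, Tuple, Union
--
-- def pack_data_points_by_length(
--     lengths: List[int], max_length: int, max_size: int = -1
-- ) -> List[List[int]]:
--     """given lengths of data points, we merge consecutive data points into a new data point, as long as the concatenated length is less than max_length
--     Args:
--         lengths (List[int]): List of lengths of data points
--         max_length (int): the concatenated length must be less than or equal max_length
--         max_size: if != -1; the maximum number of consecutive items being merged; max_size: -1 --> no limit for number of items being merged
--
--     max_size: the maximum number of data points being merged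
--     For example, lengths=[1, 3, 2, 2, 6, 4, 2, 6, 5]; max_length=10
--     if max_size=-1 --> [[0,1,2,3], [4, 5], [6,7], [8]]
--     if max_size=3 --> [[0,1,2], [3,4], [5, 6], [7], [8]]
--
--     Returns:
--         _type_: groups of indices: [[index1, index2, ...], [], ...]
--     """
--     result = []
--     current_concatenated_length = 0
--     current_list = []
--     for i in range(len(lengths)):
--         cur_length = lengths[i]
--         if cur_length + current_concatenated_length <= max_length and (
--             max_size == -1 or len(current_list) < max_size
--         ):
--             current_concatenated_length += cur_length
--             current_list.append(i)
--         else:  # current_list is done, create a new one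
--             if len(current_list) > 0:
--                 result.append(current_list)
--             current_list = [i]
--             current_concatenated_length = cur_length
--
--     if len(current_list) > 0:
--         result.append(current_list)
--
--     # assert to make sure no indices were missing
--     assert sum([len(indices) for indices in result]) == len(lengths)
--     return result
-- ===== SOURCE B (Python) =====
-- def pack_data_points_by_length(lengths, max_length, max_size=-1):
--     """Boundary-based packing: one pass records only the group START positions
--     (cut points) plus a running total; index groups are materialised afterwards
--     as ranges between consecutive boundaries."""
--     cuts = []
--     total = 0
--     for i, x in enumerate(lengths):
--         if not cuts or total + x > max_length or (
--             max_size != -1 and i - cuts[-1] >= max_size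
--         ):
--             cuts.append(i)
--             total = x
--         else:
--             total += x
--     bounds = cuts + [len(lengths)]
--     return [list(range(a, b)) for a, b in zip(bounds, bounds[1:])]
-- ===== Notes on version B (the rewrite author's own statement) =====
-- stated objective: alternative
-- what changed: Instead of building the groups of indices in-line during the scan, B records only the group boundary positions (cut points) with a running total, then materialises the groups in a second stage as ranges between consecutive boundaries.
import Mathlib
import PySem

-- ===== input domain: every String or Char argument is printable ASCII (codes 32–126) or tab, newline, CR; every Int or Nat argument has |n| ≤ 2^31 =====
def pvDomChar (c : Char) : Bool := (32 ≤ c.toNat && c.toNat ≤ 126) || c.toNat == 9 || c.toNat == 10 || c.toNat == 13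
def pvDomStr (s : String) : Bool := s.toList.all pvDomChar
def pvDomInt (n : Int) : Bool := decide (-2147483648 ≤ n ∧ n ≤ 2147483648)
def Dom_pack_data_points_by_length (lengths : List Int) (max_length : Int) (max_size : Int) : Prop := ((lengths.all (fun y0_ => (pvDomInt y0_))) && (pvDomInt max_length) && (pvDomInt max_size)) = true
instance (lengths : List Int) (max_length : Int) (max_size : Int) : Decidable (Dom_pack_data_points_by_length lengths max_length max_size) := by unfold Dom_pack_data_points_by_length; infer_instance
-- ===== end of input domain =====

-- B records only group boundary positions in one pass and materialises the index
-- groups afterwards as ranges between consecutive boundaries (alternative design,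
-- same cost); return values proved equal.

-- ===== PORT A =====
-- A's for-loop over range(len(lengths)) with lengths[i]: ported as a foldl over
-- lengths.zipIdx 0 (the same iterations, same values, same state (result, cur_len, cur_list)).
def packA_step (max_length max_size : Int)
    (st : List (List Int) × Int × List Int) (p : Int × Nat) :
    List (List Int) × Int × List Int :=
  let cur_length := p.1
  if cur_length + st.2.1 ≤ max_length ∧ (max_size = -1 ∨ (st.2.2.length : Int) < max_size) then
    (st.1, st.2.1 + cur_length, st.2.2 ++ [(p.2 : Int)])
  else
    ((if st.2.2.length > 0 then st.1 ++ [st.2.2] else st.1), cur_length, [(p.2 : Int)])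

-- the final `if len(current_list) > 0: result.append(current_list)` after the loop
def packA_final (st : List (List Int) × Int × List Int) : List (List Int) :=
  if st.2.2.length > 0 then st.1 ++ [st.2.2] else st.1

def pack_data_points_by_length (lengths : List Int) (max_length : Int) (max_size : Int) : List (List Int) :=
  packA_final ((lengths.zipIdx 0).foldl (packA_step max_length max_size) ([], 0, []))
  -- A's closing assert (sum of group sizes == len(lengths)) always holds, so A is total.

-- ===== PORT B =====
-- B's for-loop over enumerate(lengths): state is (cuts, total).
-- `cuts[-1]` (read only under the `cuts ≠ []` short-circuit) is ported as getLastD 0.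
def packB_step (max_length max_size : Int)
    (st : List Int × Int) (p : Int × Nat) : List Int × Int :=
  let x := p.1
  let i : Int := (p.2 : Int)
  if st.1 = [] ∨ st.2 + x > max_length ∨ (max_size ≠ -1 ∧ i - st.1.getLastD 0 ≥ max_size) then
    (st.1 ++ [i], x)
  else
    (st.1, st.2 + x)

def pack_data_points_by_length_alt (lengths : List Int) (max_length : Int) (max_size : Int) : List (List Int) :=
  let cuts := ((lengths.zipIdx 0).foldl (packB_step max_length max_size) ([], 0)).1
  let bounds := cuts ++ [(lengths.length : Int)]
  (bounds.zip bounds.tail).map (fun p => PySem.List.pyRange p.1 p.2 1)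

-- ===== PRECONDITION & SPEC =====
def Spec_pack_data_points_by_length (lengths : List Int) (max_length : Int) (max_size : Int) (out : List (List Int)) : Prop := out = pack_data_points_by_length_alt lengths max_length max_size
instance (lengths : List Int) (max_length : Int) (max_size : Int) (out : List (List Int)) : Decidable (Spec_pack_data_points_by_length lengths max_length max_size out) := by unfold Spec_pack_data_points_by_length; infer_instance

-- ===== CLAIM =====
def Claim_equal_pack_data_points_by_length : Prop := ∀ (lengths : List Int) (max_length : Int) (max_size : Int), Dom_pack_data_points_by_length lengths max_length max_size → Spec_pack_data_points_by_length lengths max_length max_size (pack_data_points_by_length lengths max_length max_size)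

-- ===== LEMMAS AND PROOFS =====

-- recursive materialisation of a cut list with final bound n
def mat : List Int → Int → List (List Int)
  | [], _ => []
  | c :: rest, n => PySem.List.pyRange c (rest.headD n) 1 :: mat rest n

theorem mat_eq_zip (cuts : List Int) (n : Int) :
    mat cuts n = ((cuts ++ [n]).zip (cuts ++ [n]).tail).map
      (fun p => PySem.List.pyRange p.1 p.2 1) := by
  induction cuts with
  | nil => simp [mat]
  | cons c l ih =>
    cases l with
    | nil => simp [mat]
    | cons b m =>
      simp only [mat, List.headD_cons, List.cons_append, List.tail_cons,
        List.zip_cons_cons, List.map_cons] at *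
      rw [ih]

theorem mat_snoc (cuts : List Int) (c n : Int) :
    mat (cuts ++ [c]) n = mat cuts c ++ [PySem.List.pyRange c n 1] := by
  induction cuts with
  | nil => simp [mat]
  | cons a l ih =>
    cases l with
    | nil => simp [mat]
    | cons b m =>
      simp only [mat, List.cons_append, List.headD_cons] at *
      rw [ih]

-- Main invariant: A's state corresponds to B's (cuts, total) via
-- res = mat cuts0 c, grp = pyRange c i, where B's cuts = cuts0 ++ [c], c < i.
theorem pack_loop_inv (max_length max_size : Int) :
    ∀ (rest : List Int) (i : Nat) (cuts0 : List Int) (c : Int) (total : Int),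
      c < (i : Int) →
      packA_final ((rest.zipIdx i).foldl (packA_step max_length max_size)
          (mat cuts0 c, total, PySem.List.pyRange c (i : Int) 1)) =
        mat (((rest.zipIdx i).foldl (packB_step max_length max_size) (cuts0 ++ [c], total)).1)
          ((i : Int) + rest.length) := by
  intro rest
  induction rest with
  | nil =>
    intro i cuts0 c total hci
    have hpos : 0 < (PySem.List.pyRange c (i : Int) 1).length := by
      rw [PySem.List.length_pyRange_one]; omega
    simp only [List.zipIdx, List.foldl_nil, packA_final, if_pos hpos,
      List.length_nil, Nat.cast_zero, add_zero]
    rw [mat_snoc]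
  | cons x rs ih =>
    intro i cuts0 c total hci
    rw [List.zipIdx_cons, List.foldl_cons, List.foldl_cons]
    have hlen : ((PySem.List.pyRange c (i : Int) 1).length : Int) = (i : Int) - c := by
      rw [PySem.List.length_pyRange_one]; omega
    have hlast : (cuts0 ++ [c]).getLastD 0 = c := by simp
    by_cases hc : x + total ≤ max_length ∧ (max_size = -1 ∨ (i : Int) - c < max_size)
    · -- A appends to the current group; B keeps the cut list, adds to total
      have hA : packA_step max_length max_size
          (mat cuts0 c, total, PySem.List.pyRange c (i : Int) 1) (x, i) =
          (mat cuts0 c, total + x, PySem.List.pyRange c ((i : Int) + 1) 1) := by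
        simp only [packA_step]
        rw [if_pos (by rw [hlen]; exact hc)]
        rw [PySem.List.pyRange_one_succ_right (by omega)]
      have hB : packB_step max_length max_size (cuts0 ++ [c], total) (x, i) =
          (cuts0 ++ [c], total + x) := by
        simp only [packB_step]
        rw [if_neg]
        intro h
        rcases h with h | h | ⟨hm, hge⟩
        · simp at h
        · omega
        · rw [hlast] at hge
          rcases hc.2 with h1 | h1
          · exact hm h1
          · omega
      rw [hA, hB]
      have hih := ih (i + 1) cuts0 c (total + x) (by push_cast; omega)
      push_cast at hih
      rw [hih]
      congr 1
      simp only [List.length_cons]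
      push_cast
      ring
    · -- A closes the current group; B records a new cut at i
      have hpos : 0 < (PySem.List.pyRange c (i : Int) 1).length := by
        rw [PySem.List.length_pyRange_one]; omega
      have hA : packA_step max_length max_size
          (mat cuts0 c, total, PySem.List.pyRange c (i : Int) 1) (x, i) =
          (mat cuts0 c ++ [PySem.List.pyRange c (i : Int) 1], x,
            PySem.List.pyRange (i : Int) ((i : Int) + 1) 1) := by
        simp only [packA_step]
        rw [if_neg (by rw [hlen]; exact hc), if_pos hpos,
          PySem.List.pyRange_one_singleton]
      have hB : packB_step max_length max_size (cuts0 ++ [c], total) (x, i) =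
          ((cuts0 ++ [c]) ++ [(i : Int)], x) := by
        simp only [packB_step]
        rw [if_pos]
        right
        rw [hlast]
        by_cases h1 : total + x > max_length
        · exact Or.inl h1
        · right
          constructor
          · intro he
            exact hc ⟨by omega, Or.inl he⟩
          · by_contra h2
            exact hc ⟨by omega, Or.inr (by omega)⟩
      rw [hA, hB]
      have hih := ih (i + 1) (cuts0 ++ [c]) (i : Int) x (by push_cast; omega)
      rw [mat_snoc] at hih
      push_cast at hih
      rw [hih]
      congr 1
      simp only [List.length_cons]
      push_cast
      ring

-- ===== VERDICT =====
theorem pack_data_points_by_length_spec : Claim_equal_pack_data_points_by_length := by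
  intro lengths max_length max_size _
  unfold Spec_pack_data_points_by_length
  have halt : pack_data_points_by_length_alt lengths max_length max_size =
      mat (((lengths.zipIdx 0).foldl (packB_step max_length max_size) ([], 0)).1)
        (lengths.length : Int) := by
    rw [mat_eq_zip]; rfl
  rw [halt]
  unfold pack_data_points_by_length
  cases lengths with
  | nil => simp [packA_final, mat]
  | cons l rs =>
    rw [List.zipIdx_cons, List.foldl_cons, List.foldl_cons]
    simp only [Nat.zero_add]
    have hA : packA_step max_length max_size ([], 0, []) (l, 0) = ([], l, [(0 : Int)]) := by
      simp only [packA_step]; split <;> simp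
    have hB : packB_step max_length max_size ([], 0) (l, 0) = ([(0 : Int)], l) := by
      simp [packB_step]
    rw [hA, hB]
    have h0 : ([] : List (List Int)) = mat [] 0 := rfl
    have hr : [(0 : Int)] = PySem.List.pyRange 0 (((1 : Nat) : Int)) 1 := by
      simpa using (PySem.List.pyRange_one_singleton (0 : Int)).symm
    rw [h0, hr]
    have hinv := pack_loop_inv max_length max_size rs 1 [] 0 l (by norm_num)
    simp only [List.nil_append] at hinv
    rw [hinv]
    congr 1
    simp only [List.length_cons]
    push_cast
    ring
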